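-- pv_equiv track=rewrite | github.com/5OCEANS/SoYoon_Repository | 마라톤/코스 34/Guess the Animal..py | max_common_characters
-- ===== SOURCE A (Python) =====
-- from collections import defaultdict
--
-- def max_common_characters(n, data):
--   c = defaultdict(list)
--
--   for i in range(n):
--     name, k, *characters = data[i]
--     c[i] = characters
--
--   ans = 0
--   for i in range(n):
--     for j in range(i + 1, n):
--       cnt = len(set(c[i]) & set(c[j])) # 공통 특성 개수 계산
--       ans = max(ans, cnt)
--
--   return ans + 1 # 최대 공통 특성 개수 + 1 마지막 yes를 받은 후 정답을 맞힐 수 있기 때문이다.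
-- ===== SOURCE B (Python) =====
-- from collections import Counter
--
-- def _pairs(bucket):
--     # all ordered pairs (x, y) with x before y in bucket
--     if not bucket:
--         return []
--     first, rest = bucket[0], bucket[1:]
--     return [(first, y) for y in rest] + _pairs(rest)
--
-- def max_common_characters(n, data):
--     # inverted index: characteristic -> list of animal indices (increasing)
--     occurrences = [(ch, i) for i in range(n) for ch in dict.fromkeys(data[i][2:])]
--     index = {}
--     for ch, i in occurrences:
--         index[ch] = index.get(ch, []) + [i]
--     # co-occurrence counter over each characteristic's bucket
--     counter = Counter(p for bucket in index.values() for p in _pairs(bucket))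
--     return max(counter.values(), default=0) + 1
-- ===== Notes on version B (the rewrite author's own statement) =====
-- stated objective: alternative
-- what changed: Replaces the all-pairs set-intersection double loop with an inverted index from each characteristic to its (deduplicated) animal buckets plus a pair co-occurrence Counter, returning max(counter.values(), default=0) + 1.
import Mathlib
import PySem

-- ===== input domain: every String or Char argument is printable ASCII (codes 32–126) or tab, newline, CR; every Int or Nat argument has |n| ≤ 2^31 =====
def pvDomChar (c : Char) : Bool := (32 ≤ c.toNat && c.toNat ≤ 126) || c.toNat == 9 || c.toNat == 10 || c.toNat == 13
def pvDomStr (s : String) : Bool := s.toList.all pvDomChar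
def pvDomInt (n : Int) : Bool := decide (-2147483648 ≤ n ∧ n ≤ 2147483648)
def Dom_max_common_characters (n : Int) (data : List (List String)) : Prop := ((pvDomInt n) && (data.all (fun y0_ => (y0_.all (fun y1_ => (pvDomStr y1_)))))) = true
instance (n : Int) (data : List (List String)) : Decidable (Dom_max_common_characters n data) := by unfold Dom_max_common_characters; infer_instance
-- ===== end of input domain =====

-- ===== PORT A =====
-- B replaces the all-pairs set-intersection scan with an inverted characteristic->animals index
-- and a pair co-occurrence counter (objective: alternative; equal return value on Pre_).
def max_common_characters (n : Int) (data : List (List String)) : Int :=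
  -- c = defaultdict(list); for i in range(n): name, k, *characters = data[i]; c[i] = characters
  let c : PySem.Dict Int (List String) :=
    (PySem.List.pyRange 0 n 1).foldl
      (fun c i =>
        c.insert i (PySem.List.slice (PySem.List.pyGetD data i []) (some 2) none))
      PySem.Dict.empty
  -- ans = 0; for i in range(n): for j in range(i+1, n): ans = max(ans, len(set(c[i]) & set(c[j])))
  let ans : Int :=
    (PySem.List.pyRange 0 n 1).foldl
      (fun ans i =>
        (PySem.List.pyRange (i + 1) n 1).foldl
          (fun ans j =>
            max ans (PySem.Set.len (PySem.Set.inter (PySem.Set.ofList (c.getD i []))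
                                                    (PySem.Set.ofList (c.getD j [])))))
          ans)
      0
  ans + 1

-- ===== PORT B =====
-- def _pairs(bucket): if not bucket: return []; first, rest = bucket[0], bucket[1:]
--                     return [(first, y) for y in rest] + _pairs(rest)
def mccPairs : List Int → List (Int × Int)
  | [] => []
  | first :: rest => rest.map (fun y => (first, y)) ++ mccPairs rest

def max_common_characters_alt (n : Int) (data : List (List String)) : Int :=
  -- occurrences = [(ch, i) for i in range(n) for ch in dict.fromkeys(data[i][2:])]
  let occurrences : List (String × Int) :=
    (PySem.List.pyRange 0 n 1).flatMap
      (fun i =>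
        (PySem.List.dedup (PySem.List.slice (PySem.List.pyGetD data i []) (some 2) none)).map
          (fun ch => (ch, i)))
  -- index = {}; for ch, i in occurrences: index[ch] = index.get(ch, []) + [i]
  let index : PySem.Dict String (List Int) :=
    occurrences.foldl (fun d p => d.modify p.1 [] (fun b => b ++ [p.2])) PySem.Dict.empty
  -- counter = Counter(p for bucket in index.values() for p in _pairs(bucket))
  let counter : PySem.Dict (Int × Int) Int :=
    PySem.Dict.counter (index.values.flatMap mccPairs)
  -- return max(counter.values(), default=0) + 1
  PySem.List.maxD counter.values (fun x => x) 0 + 1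

-- ===== PRECONDITION & SPEC =====
-- Pre_ excludes exactly the inputs where A raises: n beyond len(data) (IndexError) or one of
-- the first n rows shorter than the 'name, k, *characters' unpacking needs (ValueError).
def Pre_max_common_characters (n : Int) (data : List (List String)) : Prop :=
  n ≤ (data.length : Int) ∧ ∀ row ∈ data.take n.toNat, 2 ≤ row.length
instance (n : Int) (data : List (List String)) : Decidable (Pre_max_common_characters n data) := by
  unfold Pre_max_common_characters; infer_instance
def pvWitness_max_common_characters : Int × List (List String) :=
  (2, [["cat", "2", "fur", "tail"], ["dog", "1", "fur"]])

def Spec_max_common_characters (n : Int) (data : List (List String)) (out : Int) : Prop := out = max_common_characters_alt n data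
instance (n : Int) (data : List (List String)) (out : Int) : Decidable (Spec_max_common_characters n data out) := by unfold Spec_max_common_characters; infer_instance

-- ===== CLAIM (what is proved, stated in full; the proofs are below) =====
def Claim_equal_max_common_characters : Prop := ∀ (n : Int) (data : List (List String)), Dom_max_common_characters n data → Pre_max_common_characters n data → Spec_max_common_characters n data (max_common_characters n data)

-- ===== LEMMAS AND PROOFS =====

-- Proof-side abbreviations ------------------------------------------------

def pvChars (data : List (List String)) (i : Int) : List String :=
  PySem.Set.ofList (PySem.List.slice (PySem.List.pyGetD data i []) (some 2) none)

def pvW (data : List (List String)) (i j : Int) : Nat :=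
  (pvChars data i).countP (fun ch => (pvChars data j).contains ch)

def pvPairs (n : Int) : List (Int × Int) :=
  (PySem.List.pyRange 0 n 1).flatMap
    (fun i => (PySem.List.pyRange (i + 1) n 1).map (fun j => (i, j)))

def pvOcc (n : Int) (data : List (List String)) : List (String × Int) :=
  (PySem.List.pyRange 0 n 1).flatMap (fun i => (pvChars data i).map (fun ch => (ch, i)))

def pvIndex (n : Int) (data : List (List String)) : PySem.Dict String (List Int) :=
  (pvOcc n data).foldl (fun d p => d.modify p.1 [] (fun b => b ++ [p.2])) PySem.Dict.empty

def pvBucket (n : Int) (data : List (List String)) (ch : String) : List Int :=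
  (PySem.List.pyRange 0 n 1).filter (fun i => (pvChars data i).contains ch)

def pvKeys (n : Int) (data : List (List String)) : List String :=
  PySem.Set.ofList ((pvOcc n data).map Prod.fst)

def pvPK (n : Int) (data : List (List String)) : List (Int × Int) :=
  (pvIndex n data).values.flatMap mccPairs

-- Generic small lemmas -----------------------------------------------------

lemma pv_foldl_max_le {β : Type} (l : List β) (f : β → Int) (init c : Int)
    (h0 : init ≤ c) (h : ∀ x ∈ l, f x ≤ c) :
    l.foldl (fun a x => max a (f x)) init ≤ c := by
  induction l generalizing init with
  | nil => simpa using h0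
  | cons x t ih =>
    simp only [List.foldl_cons]
    exact ih _ (max_le h0 (h x (by simp))) (fun y hy => h y (by simp [hy]))

lemma pv_flatMap_ite (l : List Int) (p : Int → Bool) :
    (l.flatMap (fun i => if p i then [i] else [])) = l.filter p := by
  induction l with
  | nil => rfl
  | cons x t ih => by_cases h : p x <;> simp [h, ih]

lemma pv_flatMap_congr {α β : Type} (l : List α) (f g : α → List β)
    (h : ∀ x ∈ l, f x = g x) : l.flatMap f = l.flatMap g := by
  induction l with
  | nil => rfl
  | cons x t ih =>
    simp only [List.flatMap_cons]
    rw [h x (by simp), ih (fun y hy => h y (by simp [hy]))]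

lemma pv_countP_sub (K s : List String) (p : String → Bool)
    (hK : K.Nodup) (hs : s.Nodup) (sub : ∀ x ∈ s, x ∈ K) :
    K.countP (fun c => s.contains c && p c) = s.countP p := by
  rw [List.countP_eq_length_filter, List.countP_eq_length_filter]
  rw [← List.toFinset_card_of_nodup (hK.filter _), ← List.toFinset_card_of_nodup (hs.filter _)]
  congr 1
  ext x
  simp only [List.mem_toFinset, List.mem_filter, List.contains_eq_mem, Bool.and_eq_true,
    decide_eq_true_eq]
  constructor
  · rintro ⟨_, hx, hp⟩; exact ⟨hx, hp⟩
  · rintro ⟨hx, hp⟩; exact ⟨sub x hx, hx, hp⟩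

-- A-side: the dict c and the flattened pair fold ---------------------------

lemma pv_cfold (f : Int → List String) (m : Nat) (d : PySem.Dict Int (List String)) (j : Int) :
    ((PySem.List.pyRange 0 (m : Int) 1).foldl (fun c i => c.insert i (f i)) d).getD j [] =
      if 0 ≤ j ∧ j < (m : Int) then f j else d.getD j [] := by
  induction m generalizing d with
  | zero =>
    rw [PySem.List.pyRange_one_eq_nil (by omega)]
    simp only [List.foldl_nil]
    rw [if_neg (by omega)]
  | succ m ih =>
    have hcast : ((m + 1 : Nat) : Int) = (m : Int) + 1 := by push_cast; ring
    rw [hcast, PySem.List.pyRange_one_succ_right (by positivity), List.foldl_append]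
    simp only [List.foldl_cons, List.foldl_nil]
    by_cases hj : j = (m : Int)
    · subst hj
      rw [PySem.Dict.getD_insert_self, if_pos (by omega)]
    · rw [PySem.Dict.getD_insert_of_ne _ _ _ hj, ih]
      by_cases h1 : 0 ≤ j ∧ j < (m : Int)
      · rw [if_pos h1, if_pos (by omega)]
      · rw [if_neg h1, if_neg (by omega)]

lemma pv_A_eq (n : Int) (data : List (List String)) :
    max_common_characters n data =
      ((pvPairs n).foldl (fun a p => max a ((pvW data p.1 p.2 : Int))) 0) + 1 := by
  simp only [max_common_characters]
  congr 1
  rw [pvPairs, List.foldl_flatMap]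
  apply PySem.List.foldl_congr_mem
  intro acc i hi
  rw [List.foldl_map]
  apply PySem.List.foldl_congr_mem
  intro acc2 j hj
  rw [PySem.List.mem_pyRange_one] at hi hj
  have hn : 0 < n := by omega
  have hcast : n = ((n.toNat : Nat) : Int) := by omega
  have hci : (((PySem.List.pyRange 0 n 1).foldl
      (fun c i => c.insert i (PySem.List.slice (PySem.List.pyGetD data i []) (some 2) none))
      PySem.Dict.empty).getD i []) = PySem.List.slice (PySem.List.pyGetD data i []) (some 2) none := by
    rw [hcast, pv_cfold]; rw [if_pos (by omega)]
  have hcj : (((PySem.List.pyRange 0 n 1).foldl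
      (fun c i => c.insert i (PySem.List.slice (PySem.List.pyGetD data i []) (some 2) none))
      PySem.Dict.empty).getD j []) = PySem.List.slice (PySem.List.pyGetD data j []) (some 2) none := by
    rw [hcast, pv_cfold]; rw [if_pos (by omega)]
  rw [hci, hcj]
  congr 1
  show ((((pvChars data i).filter (fun ch => (pvChars data j).contains ch)).length : Int)) = _
  rw [← List.countP_eq_length_filter]
  rfl

lemma pv_mem_pvPairs (n : Int) (p : Int × Int) :
    p ∈ pvPairs n ↔ 0 ≤ p.1 ∧ p.1 < p.2 ∧ p.2 < n := by
  obtain ⟨i, j⟩ := p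
  simp only [pvPairs, List.mem_flatMap, List.mem_map, PySem.List.mem_pyRange_one, Prod.mk.injEq]
  constructor
  · rintro ⟨a, ⟨ha0, han⟩, b, ⟨hab, hbn⟩, rfl, rfl⟩
    exact ⟨ha0, by omega, hbn⟩
  · rintro ⟨h0, hij, hn⟩
    exact ⟨i, ⟨h0, by omega⟩, j, ⟨by omega, hn⟩, rfl, rfl⟩

-- B-side: index, buckets, keys, values ------------------------------------

lemma pv_index_getD (n : Int) (data : List (List String)) (ch : String) :
    (pvIndex n data).getD ch [] = pvBucket n data ch := by
  rw [pvIndex, PySem.Dict.getD_foldl_modify_append]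
  have hempty : (PySem.Dict.empty : PySem.Dict String (List Int)).getD ch [] = [] := rfl
  rw [hempty, List.nil_append]
  rw [pvOcc, List.filter_flatMap, List.map_flatMap]
  rw [pvBucket, ← pv_flatMap_ite _ (fun i => (pvChars data i).contains ch)]
  apply pv_flatMap_congr
  intro i _
  rw [List.filter_map, List.map_map]
  have hcomp : ((fun p : String × Int => p.1 == ch) ∘ fun c => (c, i)) = (fun c => c == ch) := rfl
  rw [hcomp, List.filter_beq]
  have hnd : (pvChars data i).Nodup := PySem.Set.nodup_ofList _
  by_cases hc : ch ∈ pvChars data i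
  · rw [List.count_eq_one_of_mem hnd hc]
    simp [List.contains_eq_mem, hc]
  · rw [List.count_eq_zero.mpr hc]
    simp [List.contains_eq_mem, hc]

lemma pv_index_keys (n : Int) (data : List (List String)) :
    (pvIndex n data).keys = pvKeys n data := by
  rw [pvIndex, PySem.Dict.keys_foldl_modify_key]
  rfl

lemma pv_index_keys_nodup (n : Int) (data : List (List String)) :
    (pvIndex n data).keys.Nodup := by
  rw [pvIndex]
  exact PySem.Dict.nodup_keys_foldl_modify_key _ _ _ _ _ List.nodup_nil

lemma pv_values_eq {κ ν : Type} [BEq κ] [LawfulBEq κ] (l : List (κ × ν)) (dflt : ν)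
    (h : (List.map Prod.fst l).Nodup) :
    (PySem.Dict.mk l).values = (List.map Prod.fst l).map (fun k => (PySem.Dict.mk l).getD k dflt) := by
  induction l with
  | nil => rfl
  | cons hd tl ih =>
    obtain ⟨k, v⟩ := hd
    simp only [List.map_cons] at h ⊢
    have hk : k ∉ tl.map Prod.fst := (List.nodup_cons.mp h).1
    have htl := (List.nodup_cons.mp h).2
    show v :: (PySem.Dict.mk tl).values = _
    rw [ih htl]
    have hhd : (PySem.Dict.mk ((k, v) :: tl)).getD k dflt = v := by
      simp [PySem.Dict.getD, PySem.Dict.get?_mk_cons]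
    rw [hhd]
    congr 1
    apply List.map_congr_left
    intro k' hk'
    have hne : (k == k') = false := by
      refine beq_false_of_ne ?_
      intro he
      exact hk (he ▸ hk')
    simp [PySem.Dict.getD, PySem.Dict.get?_mk_cons, hne]

lemma pv_index_values (n : Int) (data : List (List String)) :
    (pvIndex n data).values = (pvKeys n data).map (fun ch => pvBucket n data ch) := by
  have h := pv_values_eq (pvIndex n data).items [] (pv_index_keys_nodup n data)
  calc (pvIndex n data).values
      = (pvKeys n data).map (fun ch => (pvIndex n data).getD ch []) := by
        rw [← pv_index_keys]; exact h
    _ = _ := List.map_congr_left (fun ch _ => pv_index_getD n data ch)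

lemma pv_mem_bucket (n : Int) (data : List (List String)) (ch : String) (i : Int) :
    i ∈ pvBucket n data ch ↔ 0 ≤ i ∧ i < n ∧ (pvChars data i).contains ch := by
  simp only [pvBucket, List.mem_filter, PySem.List.mem_pyRange_one]
  tauto

lemma pv_bucket_sorted (n : Int) (data : List (List String)) (ch : String) :
    (pvBucket n data ch).Pairwise (· < ·) :=
  List.Pairwise.filter _ (PySem.List.pairwise_lt_pyRange_one 0 n)

-- mccPairs -----------------------------------------------------------------

lemma pv_mem_mccPairs (b : List Int) (hb : b.Pairwise (· < ·)) (p : Int × Int) :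
    p ∈ mccPairs b ↔ p.1 ∈ b ∧ p.2 ∈ b ∧ p.1 < p.2 := by
  obtain ⟨i, j⟩ := p
  induction b with
  | nil => simp [mccPairs]
  | cons x t ih =>
    rw [List.pairwise_cons] at hb
    obtain ⟨hx, ht⟩ := hb
    simp only [mccPairs, List.mem_append, List.mem_map, List.mem_cons, Prod.mk.injEq]
    constructor
    · rintro (⟨y, hy, rfl, rfl⟩ | hp)
      · exact ⟨Or.inl rfl, Or.inr hy, hx _ hy⟩
      · obtain ⟨hi, hj, hlt⟩ := (ih ht).mp hp
        exact ⟨Or.inr hi, Or.inr hj, hlt⟩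
    · rintro ⟨hi, hj, hlt⟩
      rcases hi with rfl | hi
      · rcases hj with rfl | hj
        · exact absurd hlt (lt_irrefl _)
        · exact Or.inl ⟨j, hj, rfl, rfl⟩
      · rcases hj with rfl | hj
        · exact absurd (lt_trans hlt (hx _ hi)) (lt_irrefl _)
        · exact Or.inr ((ih ht).mpr ⟨hi, hj, hlt⟩)

lemma pv_count_mccPairs (b : List Int) (hb : b.Pairwise (· < ·)) (i j : Int) (hij : i < j) :
    List.count (i, j) (mccPairs b) = if i ∈ b ∧ j ∈ b then 1 else 0 := by
  induction b with
  | nil => simp [mccPairs]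
  | cons x t ih =>
    rw [List.pairwise_cons] at hb
    obtain ⟨hx, ht⟩ := hb
    have htnd : t.Nodup := ht.imp (fun hlt => ne_of_lt hlt)
    simp only [mccPairs] at *
    rw [List.count_append, ih ht]
    by_cases hxi : x = i
    · subst hxi
      have hmap : List.count (x, j) (t.map (fun y => (x, y))) = List.count j t := by
        have hinj : Function.Injective (fun y : Int => (x, y)) := by
          intro a b hab
          simpa using hab
        exact List.count_map_of_injective t _ hinj j
      have hxt : x ∉ t := fun hmem => absurd (hx _ hmem) (lt_irrefl _)
      rw [hmap, if_neg (fun hc => hxt hc.1)]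
      by_cases hj : j ∈ t
      · rw [List.count_eq_one_of_mem htnd hj, if_pos ⟨List.mem_cons_self, List.mem_cons_of_mem _ hj⟩]
      · rw [List.count_eq_zero.mpr hj, if_neg ?_]
        rintro ⟨-, hjx⟩
        rcases List.mem_cons.mp hjx with rfl | hjt
        · exact absurd hij (lt_irrefl _)
        · exact hj hjt
    · have hmap : List.count (i, j) (t.map (fun y => (x, y))) = 0 := by
        rw [List.count_eq_zero]
        intro hmem
        obtain ⟨y, -, hy⟩ := List.mem_map.mp hmem
        exact hxi (congrArg Prod.fst hy)
      rw [hmap, Nat.zero_add]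
      by_cases hjx : j = x
      · subst hjx
        have hit : i ∉ t := by
          intro hit
          exact absurd (lt_trans hij (hx _ hit)) (lt_irrefl _)
        rw [if_neg (fun hc => hit hc.1), if_neg ?_]
        rintro ⟨hi, -⟩
        rcases List.mem_cons.mp hi with rfl | hit'
        · exact hxi rfl
        · exact hit hit'
      · have hiff : (i ∈ x :: t ∧ j ∈ x :: t) ↔ (i ∈ t ∧ j ∈ t) := by
          constructor
          · rintro ⟨hi, hj⟩
            refine ⟨?_, ?_⟩
            · rcases List.mem_cons.mp hi with rfl | h
              · exact absurd rfl hxi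
              · exact h
            · rcases List.mem_cons.mp hj with rfl | h
              · exact absurd rfl hjx
              · exact h
          · rintro ⟨hi, hj⟩
            exact ⟨List.mem_cons_of_mem _ hi, List.mem_cons_of_mem _ hj⟩
        by_cases hc : i ∈ t ∧ j ∈ t
        · rw [if_pos hc, if_pos (hiff.mpr hc)]
        · rw [if_neg hc, if_neg (fun h => hc (hiff.mp h))]

-- pairKeys -----------------------------------------------------------------

lemma pv_chars_sub_keys (n : Int) (data : List (List String)) (i : Int)
    (h0 : 0 ≤ i) (hn : i < n) : ∀ ch ∈ pvChars data i, ch ∈ pvKeys n data := by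
  intro ch hch
  rw [pvKeys, PySem.Set.mem_ofList, List.mem_map]
  exact ⟨(ch, i), by
    rw [pvOcc, List.mem_flatMap]
    exact ⟨i, by rw [PySem.List.mem_pyRange_one]; omega, List.mem_map_of_mem hch⟩, rfl⟩

lemma pv_count_PK (n : Int) (data : List (List String)) (i j : Int)
    (h0 : 0 ≤ i) (hij : i < j) (hj : j < n) :
    List.count (i, j) (pvPK n data) = pvW data i j := by
  rw [pvPK, pv_index_values, List.flatMap_map, List.count_flatMap]
  have hstep : ∀ ch ∈ pvKeys n data,
      (List.count (i, j) ∘ fun a => mccPairs (pvBucket n data a)) ch =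
        if ((pvChars data i).contains ch && (pvChars data j).contains ch) then 1 else 0 := by
    intro ch _
    show List.count (i, j) (mccPairs (pvBucket n data ch)) = _
    rw [pv_count_mccPairs _ (pv_bucket_sorted n data ch) _ _ hij]
    by_cases hc : ((pvChars data i).contains ch && (pvChars data j).contains ch) = true
    · rw [if_pos hc, if_pos]
      obtain ⟨h1, h2⟩ := Bool.and_eq_true_iff.mp hc
      exact ⟨(pv_mem_bucket n data ch i).mpr ⟨h0, by omega, h1⟩,
             (pv_mem_bucket n data ch j).mpr ⟨by omega, hj, h2⟩⟩
    · rw [if_neg hc, if_neg]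
      rintro ⟨h1, h2⟩
      exact hc (Bool.and_eq_true_iff.mpr
        ⟨((pv_mem_bucket n data ch i).mp h1).2.2, ((pv_mem_bucket n data ch j).mp h2).2.2⟩)
  rw [List.map_congr_left hstep, PySem.List.sum_map_ite_one_zero_nat]
  rw [pvW]
  exact pv_countP_sub _ _ _ (PySem.Set.nodup_ofList _) (PySem.Set.nodup_ofList _)
    (pv_chars_sub_keys n data i h0 (by omega))

lemma pv_mem_PK (n : Int) (data : List (List String)) (p : Int × Int) (hp : p ∈ pvPK n data) :
    0 ≤ p.1 ∧ p.1 < p.2 ∧ p.2 < n := by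
  rw [pvPK, List.mem_flatMap] at hp
  obtain ⟨b, hb, hpb⟩ := hp
  rw [pv_index_values, List.mem_map] at hb
  obtain ⟨ch, -, rfl⟩ := hb
  obtain ⟨h1, h2, h3⟩ := (pv_mem_mccPairs _ (pv_bucket_sorted n data ch) p).mp hpb
  obtain ⟨ha, hb', -⟩ := (pv_mem_bucket n data ch p.1).mp h1
  obtain ⟨-, hd, -⟩ := (pv_mem_bucket n data ch p.2).mp h2
  exact ⟨ha, h3, hd⟩

lemma pv_PK_mem_of (n : Int) (data : List (List String)) (i j : Int)
    (h0 : 0 ≤ i) (hij : i < j) (hj : j < n) (hW : 0 < pvW data i j) :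
    (i, j) ∈ pvPK n data := by
  rw [pvW] at hW
  obtain ⟨ch, hch, hcj⟩ := List.countP_pos_iff.mp hW
  rw [pvPK, List.mem_flatMap]
  refine ⟨pvBucket n data ch, ?_, ?_⟩
  · rw [pv_index_values]
    exact List.mem_map_of_mem (pv_chars_sub_keys n data i h0 (by omega) ch hch)
  · refine (pv_mem_mccPairs _ (pv_bucket_sorted n data ch) (i, j)).mpr ?_
    refine ⟨(pv_mem_bucket n data ch i).mpr ⟨h0, by omega, ?_⟩,
            (pv_mem_bucket n data ch j).mpr ⟨by omega, hj, hcj⟩, hij⟩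
    rw [List.contains_eq_mem]
    exact decide_eq_true hch

-- B reduced ---------------------------------------------------------------

lemma pv_B_eq (n : Int) (data : List (List String)) :
    max_common_characters_alt n data =
      PySem.List.maxD (PySem.Dict.counter (pvPK n data)).values (fun x => x) 0 + 1 := by
  simp only [max_common_characters_alt, PySem.List.dedup_eq_ofList]
  rfl

lemma pv_counter_values (n : Int) (data : List (List String)) :
    (PySem.Dict.counter (pvPK n data)).values =
      (PySem.Set.ofList (pvPK n data)).map (fun k => (List.count k (pvPK n data) : Int)) := by
  show ((PySem.Dict.counter (pvPK n data)).items.map (fun x => x.2)) = _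
  rw [PySem.Dict.items_counter, List.map_map]
  rfl

-- The max equality ---------------------------------------------------------

lemma pv_max_eq (n : Int) (data : List (List String)) :
    ((pvPairs n).foldl (fun a p => max a ((pvW data p.1 p.2 : Int))) 0) =
      PySem.List.maxD (PySem.Dict.counter (pvPK n data)).values (fun x => x) 0 := by
  have hM0 : (0 : Int) ≤ (pvPairs n).foldl (fun a p => max a ((pvW data p.1 p.2 : Int))) 0 :=
    (PySem.List.le_foldl_max_int (pvPairs n) _ 0).1
  have hvals := pv_counter_values n data
  have hmaxD : PySem.List.maxD (PySem.Dict.counter (pvPK n data)).values (fun x => x) 0 =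
      (PySem.List.max? (PySem.Dict.counter (pvPK n data)).values (fun x => x)).getD 0 := rfl
  cases hmx : PySem.List.max? (PySem.Dict.counter (pvPK n data)).values (fun x => x) with
  | none =>
    have hnil : (PySem.Dict.counter (pvPK n data)).values = [] :=
      (PySem.List.max?_eq_none_iff _ _).mp hmx
    have hPKnil : pvPK n data = [] := by
      by_contra hne
      obtain ⟨q, hq⟩ := List.exists_mem_of_ne_nil _ hne
      have : ((List.count q (pvPK n data) : Int)) ∈ (PySem.Dict.counter (pvPK n data)).values := by
        rw [hvals]
        exact List.mem_map_of_mem ((PySem.Set.mem_ofList _ _).mpr hq)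
      rw [hnil] at this
      exact absurd this (List.not_mem_nil)
    rw [hmaxD, hmx]
    show _ = (0 : Int)
    refine le_antisymm ?_ hM0
    apply pv_foldl_max_le _ _ _ _ le_rfl
    intro p hp
    obtain ⟨h0, hij, hjn⟩ := (pv_mem_pvPairs n p).mp hp
    by_contra hgt
    have hWpos : 0 < pvW data p.1 p.2 := by
      rcases Nat.eq_zero_or_pos (pvW data p.1 p.2) with hz | hpos
      · rw [hz] at hgt
        exact absurd le_rfl (by exact_mod_cast hgt)
      · exact hpos
    have := pv_PK_mem_of n data p.1 p.2 h0 hij hjn hWpos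
    rw [hPKnil] at this
    exact absurd this (List.not_mem_nil)
  | some m =>
    rw [hmaxD, hmx]
    show _ = m
    have hmem := PySem.List.max?_mem hmx
    rw [hvals, List.mem_map] at hmem
    obtain ⟨k, hk, hkm⟩ := hmem
    have hkPK : k ∈ pvPK n data := (PySem.Set.mem_ofList _ _).mp hk
    obtain ⟨h0, hij, hjn⟩ := pv_mem_PK n data k hkPK
    have hcount : List.count k (pvPK n data) = pvW data k.1 k.2 := by
      have := pv_count_PK n data k.1 k.2 h0 hij hjn
      simpa using this
    refine le_antisymm ?_ ?_
    · -- foldl ≤ m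
      apply pv_foldl_max_le
      · rw [← hkm, hcount]; positivity
      · intro p hp
        obtain ⟨hp0, hpij, hpn⟩ := (pv_mem_pvPairs n p).mp hp
        by_cases hWp : 0 < pvW data p.1 p.2
        · have hpPK := pv_PK_mem_of n data p.1 p.2 hp0 hpij hpn hWp
          have hval : ((List.count p (pvPK n data) : Int)) ∈
              (PySem.Dict.counter (pvPK n data)).values := by
            rw [hvals]
            exact List.mem_map_of_mem ((PySem.Set.mem_ofList _ _).mpr hpPK)
          have hle := PySem.List.max?_isMax hmx _ hval
          have hcp : List.count p (pvPK n data) = pvW data p.1 p.2 := by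
            have := pv_count_PK n data p.1 p.2 hp0 hpij hpn
            simpa using this
          rw [hcp] at hle
          exact hle
        · have : pvW data p.1 p.2 = 0 := Nat.eq_zero_of_not_pos hWp
          rw [this]
          rw [← hkm, hcount]
          positivity
    · -- m ≤ foldl
      rw [← hkm, hcount]
      have hkPairs : k ∈ pvPairs n := (pv_mem_pvPairs n k).mpr ⟨h0, hij, hjn⟩
      exact (PySem.List.le_foldl_max_int (pvPairs n) (fun p => ((pvW data p.1 p.2 : Int))) 0).2 k hkPairs

-- ===== VERDICT (by name: the statement is the Claim_ definition above) =====
theorem max_common_characters_spec : Claim_equal_max_common_characters := by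
  intro n data _ _
  show max_common_characters n data = max_common_characters_alt n data
  rw [pv_A_eq, pv_B_eq, pv_max_eq]
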